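-- pv_equiv track=rewrite | github.com/binghuang2018/aqml | cheminfo/molecule/amon_f.py | _limited_combinations
-- ===== SOURCE A (Python) =====
-- def _limited_combinations(container, last, i, limit):
--     # Keep track of the set of current atoms as well as the list of extensions.
--     # (An external extension doesn't always add an atom. Think of
--     #   C1CC1 where the first "CC" adds two edges, both to the same atom.)
--     if i == last:
--         yield set(), []
--         if limit >= 1:
--             ext = container[i]
--             yield set([ext[1]]), [ext]
--     else:
--         for subatoms, subcombinations in _limited_combinations(container, last, i+1, limit):
--             assert len(subatoms) <= limit
--             yield subatoms, subcombinations
--             new_subatoms = subatoms.copy()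
--             ext = container[i]
--             new_subatoms.add(ext[1])
--             if len(new_subatoms) <= limit:
--                 yield new_subatoms, [ext] + subcombinations
-- ===== SOURCE B (Python) =====
-- def _limited_combinations(container, last, i, limit):
--     # Explicit-stack DFS over include/exclude decisions instead of self-recursion;
--     # same yield order (exclude branch explored before the include branch).
--     stack = []
--     if limit >= 1:
--         ext = container[last]
--         stack.append(({ext[1]}, [ext], last - 1))
--     stack.append((set(), [], last - 1))
--     while stack:
--         atoms, combos, j = stack.pop()
--         if j < i:
--             yield atoms, combos
--             continue
--         ext = container[j]
--         grown = atoms | {ext[1]}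
--         if len(grown) <= limit:
--             stack.append((grown, [ext] + combos, j - 1))
--         stack.append((atoms, combos, j - 1))
-- ===== Notes on version B (the rewrite author's own statement) =====
-- stated objective: alternative
-- what changed: Replaces the self-recursive generator with an iterative while-loop over an explicit stack of pending (atoms, combos, next-index) subtrees, popping a node and either yielding it or pushing its exclude/include children; same yield order, no recursion.
import Mathlib
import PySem

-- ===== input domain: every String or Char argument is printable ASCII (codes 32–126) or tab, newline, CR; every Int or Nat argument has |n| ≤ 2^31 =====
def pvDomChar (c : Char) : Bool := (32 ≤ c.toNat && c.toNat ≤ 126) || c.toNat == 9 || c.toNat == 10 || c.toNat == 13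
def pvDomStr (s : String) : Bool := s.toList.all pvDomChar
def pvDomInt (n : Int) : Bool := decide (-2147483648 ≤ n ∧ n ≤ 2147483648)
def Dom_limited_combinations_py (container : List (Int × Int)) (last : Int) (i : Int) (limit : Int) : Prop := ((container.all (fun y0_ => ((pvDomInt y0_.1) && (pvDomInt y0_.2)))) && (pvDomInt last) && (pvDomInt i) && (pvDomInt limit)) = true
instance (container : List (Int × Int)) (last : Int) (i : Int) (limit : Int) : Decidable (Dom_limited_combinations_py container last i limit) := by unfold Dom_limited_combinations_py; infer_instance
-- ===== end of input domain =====

-- B replaces A's self-recursive generator by an explicit-stack DFS while-loop; return values proved equal on Pre_.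
-- ===== PORT A =====
def limited_combinations_py (container : List (Int × Int)) (last : Int) (i : Int) (limit : Int) : List (List Int × (List (Int × Int))) :=
  if i = last then
    [((PySem.Set.empty : PySem.Set Int), ([] : List (Int × Int)))] ++
      (if 1 ≤ limit then
        let ext := PySem.List.pyGetD container i (0, 0)
        [((PySem.Set.ofList [ext.2] : PySem.Set Int), [ext])]
      else [])
  else if _h : i < last then
    (limited_combinations_py container last (i + 1) limit).flatMap (fun sub =>
      let ext := PySem.List.pyGetD container i (0, 0)
      let new_subatoms := PySem.Set.add sub.1 ext.2
      [sub] ++ (if (PySem.Set.len new_subatoms : Int) ≤ limit then [(new_subatoms, ext :: sub.2)] else []))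
  else []  -- Python recurses forever here (i > last): outside Pre_
termination_by (last - i).toNat
decreasing_by omega

-- ===== PORT B =====
-- Stack node = (atoms, combos, j): a pending subtree that still has to decide indices j, j-1, …, i.
-- pvNodeW/pvStackW: termination measure of B's while-loop (cited by pvRun's decreasing_by).
def pvNodeW (i : Int) (j : Int) : Nat := 3 ^ ((j + 1 - i).toNat + 1)
def pvStackW (i : Int) (st : List ((List Int) × (List (Int × Int)) × Int)) : Nat :=
  (st.map (fun n => pvNodeW i n.2.2)).sum

theorem pvStackW_pop (i : Int) (n : (List Int) × (List (Int × Int)) × Int)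
    (st : List ((List Int) × (List (Int × Int)) × Int)) :
    pvStackW i (n :: st) = pvNodeW i n.2.2 + pvStackW i st := by simp [pvStackW]

theorem pvNodeW_pos (i j : Int) : 0 < pvNodeW i j := by unfold pvNodeW; positivity

theorem pvNodeW_two_lt (i j : Int) (h : ¬ j < i) : pvNodeW i (j - 1) + pvNodeW i (j - 1) < pvNodeW i j := by
  unfold pvNodeW
  have h1 : (j + 1 - i).toNat = ((j - 1) + 1 - i).toNat + 1 := by omega
  rw [h1]
  have h3 : (3:Nat) ^ (((j - 1) + 1 - i).toNat + 1) = 3 ^ (((j - 1) + 1 - i).toNat) * 3 := pow_succ 3 _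
  have hq : 0 < (3:Nat) ^ (((j - 1) + 1 - i).toNat) := by positivity
  omega

-- the while-loop of B: pop a node, either yield it (j < i) or push its two children (exclude on top)
def pvRun (container : List (Int × Int)) (i : Int) (limit : Int)
    (st : List ((List Int) × (List (Int × Int)) × Int)) : List (List Int × (List (Int × Int))) :=
  match st with
  | [] => []
  | (atoms, combos, j) :: rest =>
    if _hj : j < i then
      (atoms, combos) :: pvRun container i limit rest
    else
      let ext := PySem.List.pyGetD container j (0, 0)
      let grown := PySem.Set.add atoms ext.2
      pvRun container i limit
        ((atoms, combos, j - 1) ::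
          (if (PySem.Set.len grown : Int) ≤ limit then (grown, ext :: combos, j - 1) :: rest else rest))
termination_by pvStackW i st
decreasing_by
  · simp only [pvStackW_pop]; have := pvNodeW_pos i j; omega
  · simp only [pvStackW_pop]
    split
    · simp only [pvStackW_pop]
      have h2 := pvNodeW_two_lt i j _hj; omega
    · have h2 := pvNodeW_two_lt i j _hj
      have := pvNodeW_pos i (j-1); omega

def limited_combinations_py_alt (container : List (Int × Int)) (last : Int) (i : Int) (limit : Int) : List (List Int × (List (Int × Int))) :=
  let stack : List ((List Int) × (List (Int × Int)) × Int) :=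
    ((PySem.Set.empty : PySem.Set Int), ([] : List (Int × Int)), last - 1) ::
      (if 1 ≤ limit then
        let ext := PySem.List.pyGetD container last (0, 0)
        [((PySem.Set.ofList [ext.2] : PySem.Set Int), [ext], last - 1)]
      else [])
  pvRun container i limit stack

-- ===== PRECONDITION & SPEC =====
-- Pre_: exactly where A returns. i > last recurses forever (RecursionError); i < last with limit < 0
-- hits the assert (AssertionError); container[j] is executed for every j in [i, last-1] and, when
-- limit >= 1, for j = last as well, so those indices must be in Python range (else IndexError).
def Pre_limited_combinations_py (container : List (Int × Int)) (last : Int) (i : Int) (limit : Int) : Prop :=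
  (i = last ∧ (1 ≤ limit → PySem.Raise.InRange container.length i)) ∨
  (i < last ∧ 0 ≤ limit ∧ PySem.Raise.InRange container.length i ∧ last - 1 < (container.length : Int) ∧
    (1 ≤ limit → PySem.Raise.InRange container.length last))
instance (container : List (Int × Int)) (last : Int) (i : Int) (limit : Int) : Decidable (Pre_limited_combinations_py container last i limit) := by unfold Pre_limited_combinations_py; infer_instance
def pvWitness_limited_combinations_py : (List (Int × Int)) × Int × Int × Int := ([(1, 2), (3, 4), (5, 4)], 2, 0, 2)

def Spec_limited_combinations_py (container : List (Int × Int)) (last : Int) (i : Int) (limit : Int) (out : List (List Int × (List (Int × Int)))) : Prop := out = limited_combinations_py_alt container last i limit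
instance (container : List (Int × Int)) (last : Int) (i : Int) (limit : Int) (out : List (List Int × (List (Int × Int)))) : Decidable (Spec_limited_combinations_py container last i limit out) := by unfold Spec_limited_combinations_py; infer_instance

-- ===== CLAIM (what is proved, stated in full; the proofs are below) =====
def Claim_equal_limited_combinations_py : Prop := ∀ (container : List (Int × Int)) (last : Int) (i : Int) (limit : Int), Dom_limited_combinations_py container last i limit → Pre_limited_combinations_py container last i limit → Spec_limited_combinations_py container last i limit (limited_combinations_py container last i limit)

-- ===== LEMMAS AND PROOFS =====

-- yield sequence of one DFS subtree rooted at (s, c, j)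
def pvLeaves (container : List (Int × Int)) (i : Int) (limit : Int)
    (s : List Int) (c : List (Int × Int)) (j : Int) : List (List Int × (List (Int × Int))) :=
  if _hj : j < i then [(s, c)]
  else
    let ext := PySem.List.pyGetD container j (0, 0)
    let grown := PySem.Set.add s ext.2
    pvLeaves container i limit s c (j - 1) ++
      (if (PySem.Set.len grown : Int) ≤ limit then pvLeaves container i limit grown (ext :: c) (j - 1) else [])
termination_by (j + 1 - i).toNat
decreasing_by all_goals omega

-- the stack loop yields the concatenation of its nodes' subtree leaves, in order
theorem pvRun_eq_flatMap (container : List (Int × Int)) (i : Int) (limit : Int) :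
    ∀ st, pvRun container i limit st = st.flatMap (fun n => pvLeaves container i limit n.1 n.2.1 n.2.2) := by
  intro st
  induction st using pvRun.induct container i limit
  case case1 => simp [pvRun]
  case case2 atoms combos j rest hj ih =>
    rw [pvRun]
    simp only [dif_pos hj, ih, List.flatMap_cons]
    rw [pvLeaves]
    simp [dif_pos hj]
  case case3 atoms combos j rest hnj ext grown ih =>
    rw [pvRun]
    simp only [dif_neg hnj]
    simp only [dite_eq_ite] at ih
    rw [ih]
    conv_rhs => rw [List.flatMap_cons]
    conv_rhs => rw [pvLeaves]
    simp only [dif_neg hnj]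
    split
    · simp only [List.flatMap_cons, List.append_assoc]
      rfl
    · simp [List.flatMap_cons]

-- the expansion A performs at index m, on one (atoms, combos) pair
def pvStep (container : List (Int × Int)) (limit : Int) (m : Int)
    (sub : List Int × (List (Int × Int))) : List (List Int × (List (Int × Int))) :=
  let ext := PySem.List.pyGetD container m (0, 0)
  let new_subatoms := PySem.Set.add sub.1 ext.2
  [sub] ++ (if (PySem.Set.len new_subatoms : Int) ≤ limit then [(new_subatoms, ext :: sub.2)] else [])

-- a subtree at level m is: expand index m once, then the two subtrees at level m-1
theorem pvLeaves_step (container : List (Int × Int)) (i : Int) (limit : Int)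
    (s : List Int) (c : List (Int × Int)) (m : Int) (hm : i ≤ m) :
    pvLeaves container i limit s c m =
      (pvStep container limit m (s, c)).flatMap
        (fun n => pvLeaves container i limit n.1 n.2 (m - 1)) := by
  rw [pvLeaves]
  simp only [dif_neg (by omega : ¬ m < i), pvStep]
  split <;> simp

-- A's recursion unrolled from level m: f(i) = flatMap f(m) (subtree leaves from m-1 down)
theorem pv_main (container : List (Int × Int)) (last : Int) (i : Int) (limit : Int) :
    ∀ (k : Nat) (m : Int), i ≤ m → m ≤ last → (m - i).toNat = k →
      limited_combinations_py container last i limit =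
        (limited_combinations_py container last m limit).flatMap
          (fun n => pvLeaves container i limit n.1 n.2 (m - 1)) := by
  intro k
  induction k with
  | zero =>
    intro m h1 h2 hk
    have hmi : m = i := by omega
    have hl : ∀ n : List Int × (List (Int × Int)),
        pvLeaves container i limit n.1 n.2 (m - 1) = [n] := by
      intro n; rw [pvLeaves, dif_pos (show m - 1 < i from by omega)]
    rw [hmi]
    simp only [hmi] at hl
    simp [hl]
  | succ k ih =>
    intro m h1 h2 hk
    have hm : i < m := by omega
    have hrec := ih (m - 1) (by omega) (by omega) (by omega)
    rw [hrec]
    have hf : limited_combinations_py container last (m - 1) limit =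
        (limited_combinations_py container last m limit).flatMap (pvStep container limit (m - 1)) := by
      rw [limited_combinations_py]
      rw [if_neg (by omega : ¬ m - 1 = last), dif_pos (by omega : m - 1 < last)]
      have hmm : m - 1 + 1 = m := by ring
      rw [hmm]
      rfl
    rw [hf, List.flatMap_assoc]
    refine List.flatMap_congr ?_
    intro n _
    exact (pvLeaves_step container i limit n.1 n.2 (m - 1) (by omega)).symm

-- ===== VERDICT (by name: the statement is the Claim_ definition above) =====
theorem limited_combinations_py_spec : Claim_equal_limited_combinations_py := by
  intro container last i limit _hdom hpre
  unfold Spec_limited_combinations_py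
  have hle : i ≤ last := by
    rcases hpre with ⟨h, _⟩ | ⟨h, _⟩ <;> omega
  have hmain := pv_main container last i limit (last - i).toNat last hle le_rfl rfl
  rw [limited_combinations_py_alt, pvRun_eq_flatMap, hmain]
  conv_lhs => rw [limited_combinations_py]
  rw [if_pos rfl]
  split <;> simp
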